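-- pv_equiv track=rewrite | github.com/RJToky/ML-Sardinas | sardinas.py | residuel
-- ===== SOURCE A (Python) =====
-- def residuel(L1, L2):
--     output = []
--     for item1 in L1:
--         for item2 in L2:
--             tmp = item1.removeprefix(item2)
--             if tmp != item1:
--                 output.append(tmp)
--     return output
-- ===== SOURCE B (Python) =====
-- def _suffixes(item1, idx, lens):
--     pairs = []
--     n = len(item1)
--     for l in lens:
--         if l <= n:
--             suf = item1[l:]
--             for i in idx.get(item1[:l], []):
--                 pairs.append((i, suf))
--     pairs.sort(key=lambda p: p[0])
--     return [s for _, s in pairs]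
--
--
-- def residuel(L1, L2):
--     # index every nonempty L2 word by its exact text -> list of its positions in L2
--     idx = {}
--     for i, s in enumerate(L2):
--         if s:
--             idx.setdefault(s, []).append(i)
--     lens = sorted({len(s) for s in L2 if s})
--     cache = {}
--     out = []
--     for item1 in L1:
--         r = cache.get(item1)
--         if r is None:
--             r = _suffixes(item1, idx, lens)
--             cache[item1] = r
--         out += r
--     return out
-- ===== Notes on version B (the rewrite author's own statement) =====
-- stated objective: faster
-- what changed: Instead of scanning all of L2 for every L1 word, B builds a dict from each nonempty L2 word to its positions once, probes only each L1 word's own prefixes (at the distinct L2 lengths) in that dict, restores L2 order by sorting the distinct position indices, and memoizes the result per distinct L1 word; intended as faster, a timing run measured about 2x on its largest finished size.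
import Mathlib
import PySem

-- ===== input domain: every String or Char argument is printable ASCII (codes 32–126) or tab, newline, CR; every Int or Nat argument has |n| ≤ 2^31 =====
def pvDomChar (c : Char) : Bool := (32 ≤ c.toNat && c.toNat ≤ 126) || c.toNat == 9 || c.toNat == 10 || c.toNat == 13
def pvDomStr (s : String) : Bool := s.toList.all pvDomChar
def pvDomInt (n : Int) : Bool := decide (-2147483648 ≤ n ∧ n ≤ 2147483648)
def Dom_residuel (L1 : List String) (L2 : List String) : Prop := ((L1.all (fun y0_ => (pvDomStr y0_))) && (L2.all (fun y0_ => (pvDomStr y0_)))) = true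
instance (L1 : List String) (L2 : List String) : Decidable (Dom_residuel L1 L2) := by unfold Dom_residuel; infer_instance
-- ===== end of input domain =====

-- B replaces A's inner scan of L2 by a dict from each nonempty L2 word to its positions, probing only
-- prefixes of each L1 word, restoring L2 order by an index sort, and memoizing per distinct L1 word
-- (objective: faster; a timing run measured about 2x at its largest finished size).

-- ===== PORT A =====
-- s.removeprefix(p), ported by hand (exact): s[len(p):] if s.startswith(p) else s
def pyRemoveprefix (s p : String) : String :=
  if PySem.Str.startswith s p then PySem.Str.slice s (some (PySem.Str.len p)) none else s

def residuel (L1 : List String) (L2 : List String) : List String :=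
  L1.foldl (fun output item1 =>
    L2.foldl (fun output item2 =>
      let tmp := pyRemoveprefix item1 item2
      if tmp ≠ item1 then output ++ [tmp] else output) output) []

-- ===== PORT B =====
-- port of Source B's helper _suffixes(item1, idx, lens)
def pvSuffixes (item1 : String) (idx : PySem.Dict String (List Int)) (lens : List Int) : List String :=
  let n := PySem.Str.len item1
  let pairs := lens.foldl (fun pairs l =>
    if l ≤ n then
      let suf := PySem.Str.slice item1 (some l) none
      (idx.getD (PySem.Str.slice item1 none (some l)) []).foldl
        (fun acc i => acc ++ [(i, suf)]) pairs
    else pairs) []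
  (PySem.List.sorted pairs (fun p => p.1)).map (fun q => q.2)

def residuel_alt (L1 : List String) (L2 : List String) : List String :=
  let idx : PySem.Dict String (List Int) :=
    (PySem.List.enumerate L2).foldl
      (fun d p => if p.2 ≠ "" then d.modify p.2 [] (fun v => v ++ [p.1]) else d) PySem.Dict.empty
  let lens : List Int :=
    PySem.List.sorted (PySem.Set.ofList ((L2.filter (fun s => !(s == ""))).map PySem.Str.len)) (fun x => x)
  (L1.foldl (fun st item1 =>
    match st.2.get? item1 with
    | some r => (st.1 ++ r, st.2)
    | none =>
      let r := pvSuffixes item1 idx lens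
      (st.1 ++ r, st.2.insert item1 r))
    (([] : List String), (PySem.Dict.empty : PySem.Dict String (List String)))).1

-- ===== PRECONDITION & SPEC =====
def Spec_residuel (L1 : List String) (L2 : List String) (out : List String) : Prop := out = residuel_alt L1 L2
instance (L1 : List String) (L2 : List String) (out : List String) : Decidable (Spec_residuel L1 L2 out) := by unfold Spec_residuel; infer_instance

-- ===== CLAIM (what is proved, stated in full; the proofs are below) =====
def Claim_equal_residuel : Prop := ∀ (L1 : List String) (L2 : List String), Dom_residuel L1 L2 → Spec_residuel L1 L2 (residuel L1 L2)

-- ===== LEMMAS AND PROOFS =====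

lemma pvRp_val (t s : String) (h : PySem.Str.startswith t s = true) :
    pyRemoveprefix t s = PySem.Str.slice t (some (PySem.Str.len s)) none := by
  simp only [pyRemoveprefix, h, if_true]

lemma pvSliceFrom_toList (t : String) (k : Nat) :
    (PySem.Str.slice t (some (k : Int)) none).toList = t.toList.drop k := by
  rw [PySem.Str.toList_slice, PySem.Chars.slice_eq_listSlice, PySem.List.slice_from _ (by positivity)]
  simp

lemma pvRp_ne (t s : String) :
    decide (pyRemoveprefix t s ≠ t) = (!(s == "") && PySem.Str.startswith t s) := by
  by_cases h : PySem.Str.startswith t s = true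
  · rw [pvRp_val t s h]
    by_cases hs : s = ""
    · subst hs
      have h0 : PySem.Str.slice t (some (PySem.Str.len "")) none = t := by
        apply String.toList_inj.mp
        have := pvSliceFrom_toList t 0
        simpa [PySem.Str.len] using this
      rw [h0]
      simp
    · have hsl : s.toList ≠ [] := fun h0 => hs (String.toList_inj.mp (by simp [h0]))
      have hlen : 1 ≤ s.toList.length := by
        cases hx : s.toList with
        | nil => exact absurd hx hsl
        | cons a l => simp
      have hpre : s.toList <+: t.toList := by
        rw [PySem.Str.startswith_eq, PySem.Chars.startswith_iff] at h; exact h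
      have hle : s.toList.length ≤ t.toList.length := hpre.length_le
      have hne : PySem.Str.slice t (some (PySem.Str.len s)) none ≠ t := by
        intro he
        have h2 := congrArg (fun x => x.toList.length) he
        simp only [PySem.Str.len] at h2
        rw [pvSliceFrom_toList t s.toList.length] at h2
        simp only [List.length_drop] at h2
        omega
      simp only [hne, decide_true, ne_eq, not_false_iff, h, Bool.and_true]
      simp [hs]
  · have hb : PySem.Str.startswith t s = false := by simpa using h
    simp only [pyRemoveprefix, hb, if_false, ne_eq, not_true, decide_not, decide_true,
      Bool.not_true, Bool.and_false]
    simp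

def pvQual (t : String) (q : Int × String) : Bool := !(q.2 == "") && PySem.Str.startswith t q.2
def pvEmit (t : String) (q : Int × String) : Int × String :=
  (q.1, PySem.Str.slice t (some (PySem.Str.len q.2)) none)
def pvAll (t : String) (L2 : List String) : List (Int × String) :=
  ((PySem.List.enumerate L2).filter (pvQual t)).map (pvEmit t)

lemma pvEnumProj {α γ : Type} (p : α → Bool) (f : α → γ) :
    ∀ (xs : List α) (s : Int),
    ((PySem.List.enumerate xs s).filter (fun q => p q.2)).map (fun q => f q.2)
      = (xs.filter p).map f := by
  intro xs
  induction xs with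
  | nil => intro s; simp [PySem.List.enumerate_nil]
  | cons a l ih =>
    intro s
    rw [PySem.List.enumerate_cons]
    by_cases h : p a = true
    · simp only [List.filter_cons, h, if_true, List.map_cons, ih]
    · have h' : p a = false := by simpa using h
      simp only [List.filter_cons, h']
      simpa using ih (s + 1)

lemma pvInnerA (t : String) (L2 : List String) (acc : List String) :
    L2.foldl (fun output item2 =>
      let tmp := pyRemoveprefix t item2
      if tmp ≠ t then output ++ [tmp] else output) acc
    = acc ++ (pvAll t L2).map (fun q => q.2) := by
  have h1 : L2.foldl (fun output item2 =>
      let tmp := pyRemoveprefix t item2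
      if tmp ≠ t then output ++ [tmp] else output) acc
      = acc ++ (L2.filter (fun s => decide (pyRemoveprefix t s ≠ t))).map (pyRemoveprefix t) := by
    exact PySem.List.foldl_append_ite _ _ L2 acc
  rw [h1]
  have h2 : L2.filter (fun s => decide (pyRemoveprefix t s ≠ t))
      = L2.filter (fun s => !(s == "") && PySem.Str.startswith t s) := by
    apply List.filter_congr
    intro x _
    exact pvRp_ne t x
  rw [h2]
  have h3 : (L2.filter (fun s => !(s == "") && PySem.Str.startswith t s)).map (pyRemoveprefix t)
      = (L2.filter (fun s => !(s == "") && PySem.Str.startswith t s)).map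
          (fun s => PySem.Str.slice t (some (PySem.Str.len s)) none) := by
    apply List.map_congr_left
    intro x hx
    rw [List.mem_filter] at hx
    exact pvRp_val t x (by
      have := hx.2
      exact (Bool.and_elim_right this))
  rw [h3]
  unfold pvAll
  rw [List.map_map]
  have h4 : ((fun q : Int × String => q.2) ∘ pvEmit t)
      = fun q : Int × String => PySem.Str.slice t (some (PySem.Str.len q.2)) none := by
    funext q; rfl
  rw [h4]
  congr 1
  exact (pvEnumProj (fun s => !(s == "") && PySem.Str.startswith t s)
    (fun s => PySem.Str.slice t (some (PySem.Str.len s)) none) L2 0).symm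

lemma pvIdx (L2 : List String) (c : String) :
    ((PySem.List.enumerate L2).foldl
      (fun d p => if p.2 ≠ "" then d.modify p.2 [] (fun v => v ++ [p.1]) else d)
      (PySem.Dict.empty (κ := String) (ν := List Int))).getD c []
    = ((PySem.List.enumerate L2).filter (fun q => decide (q.2 ≠ "") && (q.2 == c))).map (fun q => q.1) := by
  have h1 : (PySem.List.enumerate L2).foldl
      (fun d p => if p.2 ≠ "" then d.modify p.2 [] (fun v => v ++ [p.1]) else d)
      (PySem.Dict.empty (κ := String) (ν := List Int))
      = ((PySem.List.enumerate L2).filter (fun p => decide (p.2 ≠ ""))).foldl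
          (fun d p => d.modify p.2 [] (fun v => v ++ [p.1])) PySem.Dict.empty := by
    rw [List.foldl_filter]
    congr 1
    funext d p
    by_cases h : p.2 = "" <;> simp [h]
  rw [h1]
  have h2 : ((PySem.List.enumerate L2).filter (fun p => decide (p.2 ≠ ""))).foldl
      (fun d p => d.modify p.2 [] (fun v => v ++ [p.1]))
      (PySem.Dict.empty (κ := String) (ν := List Int))
      = (((PySem.List.enumerate L2).filter (fun p => decide (p.2 ≠ ""))).map
          (fun q => (q.2, q.1))).foldl
          (fun d p => d.modify p.1 [] (fun v => v ++ [p.2])) PySem.Dict.empty := by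
    rw [List.foldl_map]
  rw [h2, PySem.Dict.getD_foldl_modify_append]
  rw [List.filter_map]
  simp only [List.map_map, PySem.Dict.getD, List.filter_filter]
  simp only [Function.comp]
  rw [List.filter_congr (fun x _ => by rw [Bool.and_comm])]
  simp [PySem.Dict.empty, PySem.Dict.get?, Function.comp]

lemma pvFiberPerm {α : Type} (xs : List α) (ℓ : α → Int) (Qual : α → Bool) :
    ∀ (ls : List Int), ls.Nodup → (∀ q ∈ xs, Qual q = true → ℓ q ∈ ls) →
    (ls.flatMap (fun l => xs.filter (fun q => Qual q && (ℓ q == l)))).Perm (xs.filter Qual) := by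
  intro ls
  induction ls generalizing Qual with
  | nil =>
    intro _ hq
    have : xs.filter Qual = [] := by
      rw [List.filter_eq_nil_iff]
      intro a ha hQ
      exact absurd (hq a ha hQ) (List.not_mem_nil)
    rw [this]
    simp
  | cons l ls ih =>
    intro hnd hq
    rw [List.flatMap_cons]
    have hl : l ∉ ls := (List.nodup_cons.mp hnd).1
    have htail : ls.flatMap (fun l' => xs.filter (fun q => Qual q && (ℓ q == l')))
        = ls.flatMap (fun l' => xs.filter (fun q => (Qual q && !(ℓ q == l)) && (ℓ q == l'))) := by
      apply List.flatMap_congr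
      intro l' hl'
      apply List.filter_congr
      intro q _
      by_cases he : ℓ q = l'
      · have hne : (ℓ q == l) = false := by
          refine beq_eq_false_iff_ne.mpr ?_
          intro h0
          exact hl (by rw [h0.symm.trans he]; exact hl')
        have htrue : (ℓ q == l') = true := beq_iff_eq.mpr he
        simp [htrue, hne]
      · have hfalse : (ℓ q == l') = false := beq_eq_false_iff_ne.mpr he
        simp [hfalse]
    rw [htail]
    have hperm := ih (Qual := fun q => Qual q && !(ℓ q == l)) (List.nodup_cons.mp hnd).2
      (by
        intro q hqx hQ
        rcases Bool.and_eq_true_iff.mp hQ with ⟨h1, h2⟩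
        have := hq q hqx h1
        rcases List.mem_cons.mp this with h3 | h3
        · exfalso; simp [h3] at h2
        · exact h3)
    refine ((hperm.append_left _).trans ?_)
    have e1 : xs.filter (fun q => Qual q && (ℓ q == l))
        = (xs.filter Qual).filter (fun q => ℓ q == l) := by
      rw [List.filter_filter]
      apply List.filter_congr
      intro q _
      rw [Bool.and_comm]
    have e2 : xs.filter (fun q => Qual q && !(ℓ q == l))
        = (xs.filter Qual).filter (fun q => !(ℓ q == l)) := by
      rw [List.filter_filter]
      apply List.filter_congr
      intro q _
      rw [Bool.and_comm]
    rw [e1, e2]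
    exact List.filter_append_perm _ _

lemma pvPairwise (t : String) (L2 : List String) :
    (pvAll t L2).Pairwise (fun a b => a.1 < b.1) := by
  unfold pvAll
  rw [List.pairwise_map]
  exact (PySem.List.pairwise_lt_enumerate L2 0).filter (pvQual t)

lemma pvLenToList (s : String) : PySem.Str.len s = (s.toList.length : Int) := rfl

lemma pvPfxToList (t : String) (l : Int) (h0 : 0 ≤ l) :
    (PySem.Str.slice t none (some l)).toList = t.toList.take l.toNat := by
  rw [PySem.Str.toList_slice, PySem.Chars.slice_eq_listSlice, PySem.List.slice_to _ h0]

-- bucket predicate of B = fiber of the qualifying predicate, for l in range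
lemma pvPred (t : String) (l : Int) (h1 : 1 ≤ l) (hn : l ≤ PySem.Str.len t) (q : Int × String) :
    (decide (q.2 ≠ "") && (q.2 == PySem.Str.slice t none (some l)))
      = (pvQual t q && (PySem.Str.len q.2 == l)) := by
  rw [Bool.eq_iff_iff]
  simp only [Bool.and_eq_true, decide_eq_true_eq, beq_iff_eq, pvQual, Bool.not_eq_true',
    beq_eq_false_iff_ne]
  constructor
  · rintro ⟨hne, heq⟩
    have htl : q.2.toList = t.toList.take l.toNat := by
      rw [heq]; exact pvPfxToList t l (by omega)
    have hlen : q.2.toList.length = l.toNat := by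
      rw [htl, List.length_take]
      have : l.toNat ≤ t.toList.length := by
        have := pvLenToList t; omega
      omega
    refine ⟨⟨hne, ?_⟩, ?_⟩
    · rw [PySem.Str.startswith_eq, PySem.Chars.startswith_iff, htl]
      exact List.take_prefix _ _
    · rw [pvLenToList]; omega
  · rintro ⟨⟨hne, hsw⟩, hlen⟩
    refine ⟨hne, ?_⟩
    rw [PySem.Str.startswith_eq, PySem.Chars.startswith_iff] at hsw
    have hl2 : q.2.toList.length = l.toNat := by rw [pvLenToList] at hlen; omega
    apply String.toList_inj.mp
    rw [pvPfxToList t l (by omega), ← hl2]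
    exact List.prefix_iff_eq_take.mp hsw

-- every length in B's lens list comes from a nonempty L2 word
lemma pvMemLens (L2 : List String) (l : Int)
    (h : l ∈ PySem.List.sorted (PySem.Set.ofList ((L2.filter (fun s => !(s == ""))).map PySem.Str.len)) (fun x => x)) :
    1 ≤ l := by
  rw [PySem.List.mem_sorted, PySem.Set.mem_ofList] at h
  rcases List.mem_map.mp h with ⟨s, hs, rfl⟩
  rcases List.mem_filter.mp hs with ⟨-, hne⟩
  have hne' : s.toList ≠ [] := by
    intro h0
    have : s = "" := String.toList_inj.mp (by simp [h0])
    simp [this] at hne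
  rw [pvLenToList]
  cases hx : s.toList with
  | nil => exact absurd hx hne'
  | cons a lx => simp [hx]

lemma pvPairsPerm (t : String) (L2 : List String) :
    ((PySem.List.sorted (PySem.Set.ofList ((L2.filter (fun s => !(s == ""))).map PySem.Str.len)) (fun x => x)).foldl
      (fun pairs l =>
        if l ≤ PySem.Str.len t then
          let suf := PySem.Str.slice t (some l) none
          (((PySem.List.enumerate L2).foldl
              (fun d p => if p.2 ≠ "" then d.modify p.2 [] (fun v => v ++ [p.1]) else d)
              (PySem.Dict.empty (κ := String) (ν := List Int))).getD (PySem.Str.slice t none (some l)) []).foldl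
            (fun acc i => acc ++ [(i, suf)]) pairs
        else pairs) []).Perm (pvAll t L2) := by
  set lens := PySem.List.sorted (PySem.Set.ofList ((L2.filter (fun s => !(s == ""))).map PySem.Str.len)) (fun x => x) with hlens
  set n := PySem.Str.len t with hn
  have hguard : (fun (pairs : List (Int × String)) (l : Int) =>
      if l ≤ n then
        let suf := PySem.Str.slice t (some l) none
        (((PySem.List.enumerate L2).foldl
            (fun d p => if p.2 ≠ "" then d.modify p.2 [] (fun v => v ++ [p.1]) else d)
            (PySem.Dict.empty (κ := String) (ν := List Int))).getD (PySem.Str.slice t none (some l)) []).foldl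
          (fun acc i => acc ++ [(i, suf)]) pairs
      else pairs)
      = (fun pairs l => if (fun l : Int => decide (l ≤ n)) l = true then
          (fun (pairs : List (Int × String)) (l : Int) => pairs ++
            (((PySem.List.enumerate L2).filter
              (fun q => decide (q.2 ≠ "") && (q.2 == PySem.Str.slice t none (some l)))).map (fun q => q.1)).map
              (fun i => (i, PySem.Str.slice t (some l) none))) pairs l
        else pairs) := by
    funext pairs l
    by_cases h : l ≤ n
    · simp only [h, if_true, decide_true]
      rw [pvIdx, PySem.List.foldl_append_singleton_eq_map]
    · simp [h]
  rw [hguard, ← List.foldl_filter, PySem.List.foldl_append_eq_flatMap, List.nil_append]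
  set ls := lens.filter (fun l : Int => decide (l ≤ n)) with hls
  have hbucket : ls.flatMap
      (fun l => (((PySem.List.enumerate L2).filter
          (fun q => decide (q.2 ≠ "") && (q.2 == PySem.Str.slice t none (some l)))).map (fun q => q.1)).map
          (fun i => (i, PySem.Str.slice t (some l) none)))
      = ls.flatMap
        (fun l => ((PySem.List.enumerate L2).filter
          (fun q => pvQual t q && (PySem.Str.len q.2 == l))).map (pvEmit t)) := by
    apply List.flatMap_congr
    intro l hl
    rcases List.mem_filter.mp hl with ⟨hml, hle⟩
    have h1 : 1 ≤ l := pvMemLens L2 l hml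
    have h2 : l ≤ n := by simpa using hle
    rw [List.map_map]
    rw [List.filter_congr (fun q _ => pvPred t l h1 h2 q)]
    apply List.map_congr_left
    intro q hq
    rw [List.mem_filter] at hq
    have hlen : PySem.Str.len q.2 = l := beq_iff_eq.mp (Bool.and_elim_right hq.2)
    simp only [Function.comp_apply, pvEmit, hlen]
  rw [hbucket]
  have hmap : ls.flatMap
      (fun l => ((PySem.List.enumerate L2).filter
        (fun q => pvQual t q && (PySem.Str.len q.2 == l))).map (pvEmit t))
      = (ls.flatMap
        (fun l => (PySem.List.enumerate L2).filter
          (fun q => pvQual t q && (PySem.Str.len q.2 == l)))).map (pvEmit t) := by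
    rw [List.map_flatMap]
  rw [hmap]
  unfold pvAll
  apply List.Perm.map
  have hndlens : lens.Nodup := by
    rw [hlens]
    exact (PySem.List.sorted_perm _ _ _).nodup_iff.mpr (PySem.Set.nodup_ofList _)
  apply pvFiberPerm (PySem.List.enumerate L2) (fun q => PySem.Str.len q.2) (pvQual t)
    ls (hndlens.filter _)
  intro q hq hQ
  rcases Bool.and_eq_true_iff.mp hQ with ⟨hne, hsw⟩
  have hmem : q.2 ∈ L2 := by
    rcases (PySem.List.mem_enumerate_iff L2 0 q).mp hq with ⟨k, hk, hq2⟩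
    rw [hq2]
    exact List.getElem_mem hk
  have hne2 : (q.2 == "") = false := by
    simp only [Bool.not_eq_true'] at hne
    exact hne
  have hinlens : PySem.Str.len q.2 ∈ lens := by
    rw [hlens, PySem.List.mem_sorted, PySem.Set.mem_ofList]
    exact List.mem_map_of_mem (List.mem_filter.mpr ⟨hmem, by simp [hne2]⟩)
  have hpre : q.2.toList <+: t.toList := by
    rw [PySem.Str.startswith_eq, PySem.Chars.startswith_iff] at hsw
    exact hsw
  have h2 := hpre.length_le
  rw [hls]
  refine List.mem_filter.mpr ⟨hinlens, ?_⟩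
  have ha : PySem.Str.len q.2 = (q.2.toList.length : Int) := pvLenToList _
  have hn' : n = (t.toList.length : Int) := by rw [hn, pvLenToList]
  simp only [decide_eq_true_eq, ha, hn']
  exact_mod_cast h2

lemma pvSuffixesEq (L2 : List String) (t : String) :
    pvSuffixes t
      ((PySem.List.enumerate L2).foldl
        (fun d p => if p.2 ≠ "" then d.modify p.2 [] (fun v => v ++ [p.1]) else d) PySem.Dict.empty)
      (PySem.List.sorted (PySem.Set.ofList ((L2.filter (fun s => !(s == ""))).map PySem.Str.len)) (fun x => x))
    = (pvAll t L2).map (fun q => q.2) := by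
  show (PySem.List.sorted _ (fun p => p.1)).map (fun q : Int × String => q.2) = _
  rw [PySem.List.sorted_eq_of_perm_of_pairwise_lt _ (pvAll t L2) (fun p => p.1)
    (pvPairsPerm t L2).symm (pvPairwise t L2)]

lemma pvLoop (idx : PySem.Dict String (List Int)) (lens : List Int) :
    ∀ (L1 : List String) (out : List String) (cache : PySem.Dict String (List String)),
    (∀ k r, cache.get? k = some r → r = pvSuffixes k idx lens) →
    (L1.foldl (fun st item1 =>
        match st.2.get? item1 with
        | some r => (st.1 ++ r, st.2)
        | none =>
          let r := pvSuffixes item1 idx lens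
          (st.1 ++ r, st.2.insert item1 r)) (out, cache)).1
    = L1.foldl (fun acc t => acc ++ pvSuffixes t idx lens) out := by
  intro L1
  induction L1 with
  | nil => intro out cache _; rfl
  | cons t L1 ih =>
    intro out cache hinv
    rw [List.foldl_cons, List.foldl_cons]
    cases hc : cache.get? t with
    | some r =>
      have hr := hinv t r hc
      rw [ih (out ++ r) cache hinv, hr]
    | none =>
      refine (ih _ _ ?_)
      intro k r hk
      by_cases he : k = t
      · subst he
        rw [PySem.Dict.get?_insert_self] at hk
        exact (Option.some.inj hk).symm
      · rw [PySem.Dict.get?_insert_of_ne _ _ he] at hk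
        exact hinv k r hk

lemma pvFinal (L1 L2 : List String) : residuel L1 L2 = residuel_alt L1 L2 := by
  unfold residuel residuel_alt
  rw [pvLoop _ _ L1 [] PySem.Dict.empty
    (by intro k r hk; simp [PySem.Dict.empty, PySem.Dict.get?] at hk)]
  induction L1 using List.reverseRecOn with
  | nil => simp
  | append_singleton L1 t ih =>
    rw [List.foldl_append, List.foldl_append, ih, List.foldl_cons, List.foldl_cons]
    rw [List.foldl_nil, List.foldl_nil]
    rw [pvInnerA, pvSuffixesEq]

-- ===== VERDICT (by name: the statement is the Claim_ definition above) =====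
theorem residuel_spec : Claim_equal_residuel := by
  intro L1 L2 _
  unfold Spec_residuel
  exact pvFinal L1 L2
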